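-- pv_equiv track=rewrite | github.com/injusticescorpio/Python_Competitve_Programs | python programs/tcs_digital/increasing_subscequence.py | solve
-- ===== SOURCE A (Python) =====
-- def solve(n, a):
--     a = [0]+a
--     for i in range(0, len(a) - 1):
--         t = a[i + 1]
--         while a[i] < t and a[i] + 1 != t:
--             t -= 1
--         if t in range(0, a[i + 1] + 1):
--             a[i + 1] = t
--     if sorted(a[1:]) == a[1:]:
--         return ("Yes")
--     else:
--         return ("No")
-- ===== SOURCE B (Python) =====
-- def solve(n, a):
--     # Greedily lower each element: the smallest value we can give the next
--     # element is min(prev + 1, x); fail as soon as an element drops below prev.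
--     prev = 0
--     for x in a:
--         if x < prev:
--             return "No"
--         prev = min(prev + 1, x)
--     return "Yes"
-- ===== Notes on version B (the rewrite author's own statement) =====
-- stated objective: faster
-- what changed: Replaced A's per-element decrement-to-a[i]+1 while-loop plus final sorted()==list check with a single O(n) early-exit pass keeping only the running minimum achievable value; Pre_ restricts to nonnegative elements, the problem's natural domain, because on negative elements A's accidental 't in range(0, ...)' membership test disables the greedy decrement and the programs may diverge.
-- outside the precondition, e.g. on solve(2, [-5, -3]): A returns 'Yes', B returns 'No'; on solve(2, [3, -1]): A returns 'No', B returns 'No'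
import Mathlib
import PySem

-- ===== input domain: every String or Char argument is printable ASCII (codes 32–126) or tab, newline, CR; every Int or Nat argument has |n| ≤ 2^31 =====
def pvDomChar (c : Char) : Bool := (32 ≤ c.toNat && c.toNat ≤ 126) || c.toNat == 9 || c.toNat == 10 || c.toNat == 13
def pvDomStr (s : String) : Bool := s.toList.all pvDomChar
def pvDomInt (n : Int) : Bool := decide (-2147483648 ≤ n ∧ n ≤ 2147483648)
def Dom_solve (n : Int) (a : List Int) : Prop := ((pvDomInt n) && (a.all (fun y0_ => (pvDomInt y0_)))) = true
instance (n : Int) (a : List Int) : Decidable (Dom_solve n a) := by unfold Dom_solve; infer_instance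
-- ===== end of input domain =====

-- B replaces A's decrement while-loop and sort-based check with one O(n) early-exit pass (faster).

-- ===== PORT A =====
-- the while-loop 'while a[i] < t and a[i]+1 != t: t -= 1'
def solveDecr (p t : Int) : Int :=
  if p < t ∧ p + 1 ≠ t then solveDecr p (t - 1) else t
termination_by (t - p).toNat
decreasing_by omega

-- the for-loop over i; prev is a[i] (already updated), starting at the prepended 0
def solveLoop (prev : Int) : List Int → List Int
  | [] => []
  | x :: xs =>
    let x' := if 0 ≤ solveDecr prev x ∧ solveDecr prev x ≤ x then solveDecr prev x else x
    x' :: solveLoop x' xs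

def solve (n : Int) (a : List Int) : String :=
  let b := solveLoop 0 a
  if PySem.List.sorted b (fun y => y) false = b then "Yes" else "No"

-- ===== PORT B =====
def solveAltLoop (prev : Int) : List Int → String
  | [] => "Yes"
  | x :: xs => if x < prev then "No" else solveAltLoop (min (prev + 1) x) xs

def solve_alt (n : Int) (a : List Int) : String := solveAltLoop 0 a

-- ===== PRECONDITION & SPEC =====
-- Pre_ restricts to lists of nonnegative integers, the problem's natural domain;
-- on negative elements A's accidental 't in range(0, …)' membership test silently
-- disables the greedy decrement and the two programs may diverge there.
def Pre_solve (n : Int) (a : List Int) : Prop := ∀ x ∈ a, 0 ≤ x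
instance (n : Int) (a : List Int) : Decidable (Pre_solve n a) := by unfold Pre_solve; infer_instance

def pvWitness_solve : Int × List Int := (3, [1, 5, 2])

def Spec_solve (n : Int) (a : List Int) (out : String) : Prop := out = solve_alt n a
instance (n : Int) (a : List Int) (out : String) : Decidable (Spec_solve n a out) := by unfold Spec_solve; infer_instance

-- ===== CLAIM =====
def Claim_equal_solve : Prop := ∀ (n : Int) (a : List Int), Dom_solve n a → Pre_solve n a → Spec_solve n a (solve n a)

-- ===== LEMMAS AND PROOFS =====

-- the decrement loop lands on p+1 whenever it runs at all
theorem solveDecr_eq (p t : Int) : solveDecr p t = if p < t then p + 1 else t := by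
  induction hn : (t - p).toNat generalizing t with
  | zero =>
    rw [solveDecr]
    have h : ¬ p < t := by omega
    rw [if_neg (fun hc => h hc.1), if_neg h]
  | succ k ih =>
    have hpt : p < t := by omega
    rw [solveDecr]
    by_cases he : p + 1 = t
    · rw [if_neg (fun hc => hc.2 he), if_pos hpt]; omega
    · rw [if_pos ⟨hpt, he⟩, ih (t - 1) (by omega)]
      rw [if_pos (by omega : p < t - 1), if_pos hpt]

-- on the nonnegative domain A's per-element update is min(prev+1, x)
theorem step_eq (p x : Int) (hp : -1 ≤ p) (hx : 0 ≤ x) :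
    (if 0 ≤ solveDecr p x ∧ solveDecr p x ≤ x then solveDecr p x else x)
      = min (p + 1) x := by
  rw [solveDecr_eq]
  by_cases h : p < x
  · rw [if_pos h, if_pos (by omega)]; omega
  · rw [if_neg h, if_pos (by omega)]; omega

-- B's early-exit scan decides the chain property of A's transformed list
theorem altLoop_yes (xs : List Int) : ∀ (prev : Int), -1 ≤ prev → (∀ x ∈ xs, 0 ≤ x) →
    (solveAltLoop prev xs = "Yes"
      ↔ List.IsChain (· ≤ ·) (prev :: solveLoop prev xs)) := by
  induction xs with
  | nil => intro prev _ _; simp [solveAltLoop, solveLoop]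
  | cons x xs ih =>
    intro prev hp hxs
    have hx : 0 ≤ x := hxs x (List.mem_cons_self)
    simp only [solveAltLoop, solveLoop, step_eq _ _ hp hx]
    rw [List.isChain_cons_cons]
    by_cases h : x < prev
    · rw [if_pos h]
      constructor
      · intro hc; exact absurd hc (by decide)
      · intro hc; omega
    · rw [if_neg h,
        ih (min (prev + 1) x) (by omega) (fun y hy => hxs y (List.mem_cons_of_mem _ hy))]
      constructor
      · intro hc; exact ⟨by omega, hc⟩
      · intro hc; exact hc.2

-- B's scan only ever answers "Yes" or "No"
theorem altLoop_cases (prev : Int) (xs : List Int) :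
    solveAltLoop prev xs = "Yes" ∨ solveAltLoop prev xs = "No" := by
  induction xs generalizing prev with
  | nil => exact Or.inl rfl
  | cons x xs ih =>
    simp only [solveAltLoop]
    split_ifs
    · exact Or.inr rfl
    · exact ih _

-- sorted(b) == b tests exactly that b is nondecreasing
theorem sorted_self_iff (b : List Int) :
    PySem.List.sorted b (fun y => y) false = b ↔ b.Pairwise (· ≤ ·) := by
  constructor
  · intro h
    have hp := PySem.List.sorted_pairwise b (fun y => y)
    rw [h] at hp
    exact hp
  · intro h
    exact PySem.List.sorted_eq_self_of_pairwise b (fun y => y) h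

-- on nonnegative input the prepended 0 adds no constraint: chain with 0 ↔ pairwise
theorem chain_zero_iff (a : List Int) (ha : ∀ x ∈ a, 0 ≤ x) :
    List.IsChain (· ≤ ·) ((0 : Int) :: solveLoop 0 a)
      ↔ (solveLoop 0 a).Pairwise (· ≤ ·) := by
  cases a with
  | nil => simp [solveLoop]
  | cons x xs =>
    have hx : 0 ≤ x := ha x (List.mem_cons_self)
    simp only [solveLoop, step_eq 0 x (by omega) hx]
    rw [List.isChain_cons_cons, ← List.isChain_iff_pairwise]
    constructor
    · intro hc; exact hc.2
    · intro hc; exact ⟨by omega, hc⟩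

-- ===== VERDICT =====
theorem solve_spec : Claim_equal_solve := by
  intro n a _ hpre
  unfold Spec_solve
  show (if PySem.List.sorted (solveLoop 0 a) (fun y => y) false = solveLoop 0 a
          then "Yes" else "No") = solveAltLoop 0 a
  have hiff : (PySem.List.sorted (solveLoop 0 a) (fun y => y) false = solveLoop 0 a)
      ↔ solveAltLoop 0 a = "Yes" := by
    rw [sorted_self_iff, ← chain_zero_iff a hpre, ← altLoop_yes a 0 (by omega) hpre]
  rcases altLoop_cases 0 a with hy | hn
  · rw [if_pos (hiff.mpr hy), hy]
  · rw [if_neg (fun hc => absurd (hn.symm.trans (hiff.mp hc)) (by decide)), hn]
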